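-- pv_equiv track=rewrite | github.com/mostgood1/NFL-Betting | scripts/reconcile_schedule_vs_predictions.py | _norm_game_id
-- ===== SOURCE A (Python) =====
-- def _norm_game_id(gid: str | None) -> str | None:
--     if gid is None:
--         return None
--     if not isinstance(gid, str):
--         gid = str(gid)
--     g = gid.strip()
--     if not g:
--         return None
--     # unify separators to underscore
--     g = g.replace('-', '_')
--     # collapse multiple underscores
--     while '__' in g:
--         g = g.replace('__', '_')
--     return g.lower()
-- ===== SOURCE B (Python) =====
-- def _norm_game_id(gid: str | None) -> str | None:
--     if gid is None:
--         return None
--     if not isinstance(gid, str):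
--         gid = str(gid)
--     g = gid.strip()
--     if not g:
--         return None
--     out = []
--     for ch in g:
--         if ch == '-' or ch == '_':
--             if not out or out[-1] != '_':
--                 out.append('_')
--         else:
--             out.append(ch)
--     return ''.join(out).lower()
-- ===== Notes on version B (the rewrite author's own statement) =====
-- stated objective: alternative
-- what changed: Replaced the separator substitution plus the repeated collapse-until-fixpoint while-loop (which rescans the whole string each pass) by a single left-to-right scan that emits one underscore per run of separator characters; it trades C-level str.replace passes for one explicit Python loop.
import Mathlib
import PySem

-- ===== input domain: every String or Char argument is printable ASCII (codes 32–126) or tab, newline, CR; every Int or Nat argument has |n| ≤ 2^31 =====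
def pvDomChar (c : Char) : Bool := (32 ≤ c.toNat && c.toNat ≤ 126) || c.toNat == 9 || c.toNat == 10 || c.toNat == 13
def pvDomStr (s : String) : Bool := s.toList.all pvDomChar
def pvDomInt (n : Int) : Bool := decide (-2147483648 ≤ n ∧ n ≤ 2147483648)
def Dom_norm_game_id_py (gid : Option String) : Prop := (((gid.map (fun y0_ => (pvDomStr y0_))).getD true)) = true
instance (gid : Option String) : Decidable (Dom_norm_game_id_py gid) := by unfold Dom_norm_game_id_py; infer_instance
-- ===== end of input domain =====

-- B replaces the replace/while-collapse pipeline by a single character scan; return value only, no mutation.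

-- ===== PORT A =====
-- helpers the port needs for its own termination proof (kept above the port as allowed):
-- rep1 is one pass of g.replace('__','_') (non-overlapping, left to right)
def rep1 : List Char → List Char
  | [] => []
  | [c] => [c]
  | a :: b :: t => if a = '_' ∧ b = '_' then '_' :: rep1 t else a :: rep1 (b :: t)

-- adjacency of two underscores, the boolean form of '__' in g
def adjUU : List Char → Bool
  | a :: b :: t => (a == '_' && b == '_') || adjUU (b :: t)
  | _ => false

theorem adjUU_iff (cs : List Char) : adjUU cs = true ↔ ['_', '_'] <:+: cs := by
  induction cs with
  | nil => simp [adjUU]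
  | cons a t ih =>
    cases t with
    | nil =>
      simp only [adjUU, List.infix_cons_iff]
      constructor
      · intro h; cases h
      · rintro (h | h)
        · have := h.length_le; simp at this
        · have := h.length_le; simp at this
    | cons b t' =>
      simp only [adjUU, List.infix_cons_iff, Bool.or_eq_true, Bool.and_eq_true, beq_iff_eq, ih]
      constructor
      · rintro (⟨ha, hb⟩ | h)
        · subst ha hb; left; exact ⟨t', rfl⟩
        · right; exact h
      · rintro (h | h)
        · left
          obtain ⟨r, hr⟩ := h
          injection hr with h1 h2
          injection h2 with h2 h3
          exact ⟨h1.symm, h2.symm⟩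
        · right; exact h

theorem rep1_length_le (cs : List Char) : (rep1 cs).length ≤ cs.length := by
  induction cs using rep1.induct with
  | case1 => simp [rep1]
  | case2 c => simp [rep1]
  | case3 a b t hab ih =>
    simp only [rep1, if_pos hab, List.length_cons]
    omega
  | case4 a b t hab ih =>
    simp only [rep1, if_neg hab, List.length_cons]
    simp only [List.length_cons] at ih ⊢
    omega

theorem rep1_length_lt (cs : List Char) (h : adjUU cs = true) :
    (rep1 cs).length < cs.length := by
  induction cs using rep1.induct with
  | case1 => simp [adjUU] at h
  | case2 c => simp [adjUU] at h
  | case3 a b t hab ih =>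
    simp only [rep1, if_pos hab, List.length_cons]
    have := rep1_length_le t
    omega
  | case4 a b t hab ih =>
    simp only [rep1, if_neg hab, List.length_cons]
    have hadj : adjUU (b :: t) = true := by
      simp only [adjUU, Bool.or_eq_true, Bool.and_eq_true, beq_iff_eq] at h
      rcases h with ⟨ha, hb⟩ | h
      · exact absurd ⟨ha, hb⟩ hab
      · exact h
    have := ih hadj
    simp only [List.length_cons] at this ⊢
    omega

-- Chars.replace with old = "__", new = "_" computes rep1
theorem replaceGo_two (fuel : Nat) (l acc : List Char) (h : l.length ≤ fuel) :
    PySem.Chars.replace.go ['_', '_'] ['_'] fuel l acc = acc.reverse ++ rep1 l := by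
  induction fuel generalizing l acc with
  | zero =>
    have : l = [] := by cases l with | nil => rfl | cons a t => simp at h
    subst this
    simp [PySem.Chars.replace.go, rep1]
  | succ fuel ih =>
    cases l with
    | nil => simp [PySem.Chars.replace.go, rep1]
    | cons a t =>
      cases t with
      | nil =>
        have hpre : List.isPrefixOf ['_', '_'] [a] = false := by
          simp [List.isPrefixOf]
        simp only [PySem.Chars.replace.go, hpre, Bool.false_eq_true, if_false]
        rw [ih [] (a :: acc) (by simp)]
        simp [rep1]
      | cons b t' =>
        by_cases hab : a = '_' ∧ b = '_'
        · obtain ⟨ha, hb⟩ := hab; subst ha hb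
          have hpre : List.isPrefixOf ['_', '_'] ('_' :: '_' :: t') = true := by
            simp [List.isPrefixOf]
          simp only [PySem.Chars.replace.go, hpre, if_true]
          rw [show List.drop (['_', '_'] : List Char).length ('_' :: '_' :: t') = t' from rfl,
              show (['_'] : List Char).reverse ++ acc = ('_' : Char) :: acc from rfl]
          rw [ih t' (('_' : Char) :: acc) (by simp at h ⊢; omega)]
          simp [rep1]
        · have hpre : List.isPrefixOf ['_', '_'] (a :: b :: t') = false := by
            simp only [List.isPrefixOf, Bool.and_eq_false_iff]
            rcases (not_and_or.mp hab) with ha | hb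
            · left; simpa using fun h => ha h.symm
            · right; left; simpa using fun h => hb h.symm
          simp only [PySem.Chars.replace.go, hpre, Bool.false_eq_true, if_false]
          rw [ih (b :: t') (a :: acc) (by simp at h ⊢; omega)]
          simp [rep1, if_neg hab]

theorem replace_two_eq_rep1 (cs : List Char) :
    PySem.Chars.replace cs ['_', '_'] ['_'] = rep1 cs := by
  rw [PySem.Chars.replace]
  simp only [List.isEmpty_cons, Bool.false_eq_true, if_false]
  rw [replaceGo_two cs.length cs [] (le_refl _)]
  simp

-- the while-loop:  while '__' in g: g = g.replace('__','_')
def collapseWhile (g : String) : String :=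
  if PySem.Str.isIn "__" g then collapseWhile (PySem.Str.replace g "__" "_") else g
termination_by g.toList.length
decreasing_by
  rename_i h
  have hinf : ['_', '_'] <:+: g.toList := by
    have := (PySem.Str.isIn_iff_infix "__" g).mp h
    simpa using this
  have hlen : (PySem.Str.replace g "__" "_").toList = rep1 g.toList := by
    rw [PySem.Str.toList_replace]
    simpa using replace_two_eq_rep1 g.toList
  rw [hlen]
  exact rep1_length_lt _ ((adjUU_iff _).mpr hinf)

def norm_game_id_py (gid : Option String) : Option String :=
  match gid with
  | none => none
  | some s =>
    let g := PySem.Str.strip s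
    if g = "" then none
    else
      let g1 := PySem.Str.replace g "-" "_"
      let g2 := collapseWhile g1
      some (PySem.Str.lower g2)

-- ===== PORT B =====
-- the for-loop of Source B: out is the accumulated character list (Python appends; out[-1] is getLast?)
def altLoop (out : List Char) (l : List Char) : List Char :=
  match l with
  | [] => out
  | c :: t =>
    if c = '-' ∨ c = '_' then
      if out.getLast? ≠ some '_' then altLoop (out ++ ['_']) t else altLoop out t
    else altLoop (out ++ [c]) t

def norm_game_id_py_alt (gid : Option String) : Option String :=
  match gid with
  | none => none
  | some s =>
    let g := PySem.Str.strip s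
    if g = "" then none
    else some (PySem.Str.lower (String.ofList (altLoop [] g.toList)))

-- ===== PRECONDITION & SPEC =====
def Spec_norm_game_id_py (gid : Option String) (out : Option String) : Prop := out = norm_game_id_py_alt gid
instance (gid : Option String) (out : Option String) : Decidable (Spec_norm_game_id_py gid out) := by unfold Spec_norm_game_id_py; infer_instance

-- ===== CLAIM (what is proved, stated in full; the proofs are below) =====
def Claim_equal_norm_game_id_py : Prop := ∀ (gid : Option String), Dom_norm_game_id_py gid → Spec_norm_game_id_py gid (norm_game_id_py gid)

-- ===== LEMMAS AND PROOFS =====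

-- canonical collapse with a flag: was the previously emitted char '_'?
def cdn : Bool → List Char → List Char
  | _, [] => []
  | b, c :: t => if c = '_' then (if b then cdn true t else '_' :: cdn true t) else c :: cdn false t

def mpc (c : Char) : Char := if c = '-' then '_' else c

theorem replaceGo_one (fuel : Nat) (l acc : List Char) (h : l.length ≤ fuel) :
    PySem.Chars.replace.go ['-'] ['_'] fuel l acc = acc.reverse ++ l.map mpc := by
  induction fuel generalizing l acc with
  | zero =>
    have : l = [] := by cases l with | nil => rfl | cons a t => simp at h
    subst this
    simp [PySem.Chars.replace.go]
  | succ fuel ih =>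
    cases l with
    | nil => simp [PySem.Chars.replace.go]
    | cons a t =>
      by_cases ha : a = '-'
      · subst ha
        have hpre : List.isPrefixOf ['-'] ('-' :: t) = true := by simp [List.isPrefixOf]
        simp only [PySem.Chars.replace.go, hpre, if_true]
        rw [show List.drop (['-'] : List Char).length ('-' :: t) = t from rfl,
            show (['_'] : List Char).reverse ++ acc = ('_' : Char) :: acc from rfl]
        rw [ih t (('_' : Char) :: acc) (by simp at h ⊢; omega)]
        simp [mpc]
      · have hpre : List.isPrefixOf ['-'] (a :: t) = false := by
          simp [List.isPrefixOf]; simpa using fun h => ha h.symm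
        simp only [PySem.Chars.replace.go, hpre, Bool.false_eq_true, if_false]
        rw [ih t (a :: acc) (by simp at h ⊢; omega)]
        simp [mpc, if_neg ha]

theorem replace_one_eq_map (cs : List Char) :
    PySem.Chars.replace cs ['-'] ['_'] = cs.map mpc := by
  rw [PySem.Chars.replace]
  simp only [List.isEmpty_cons, Bool.false_eq_true, if_false]
  rw [replaceGo_one cs.length cs [] (le_refl _)]
  simp

theorem cdn_cons_us (b : Bool) (t : List Char) :
    cdn b ('_' :: t) = if b then cdn true t else '_' :: cdn true t := by
  cases b <;> simp [cdn]

theorem cdn_cons_ne (b : Bool) (c : Char) (t : List Char) (hc : c ≠ '_') :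
    cdn b (c :: t) = c :: cdn false t := by
  cases b <;> simp [cdn, hc]

theorem cdn_rep1 (cs : List Char) (b : Bool) : cdn b (rep1 cs) = cdn b cs := by
  induction cs using rep1.induct generalizing b with
  | case1 => rfl
  | case2 c => rfl
  | case3 a b' t hab ih =>
    obtain ⟨ha, hb⟩ := hab; subst ha hb
    rw [show rep1 ('_' :: '_' :: t) = '_' :: rep1 t from by simp [rep1]]
    rw [cdn_cons_us, cdn_cons_us, cdn_cons_us]
    cases b <;> simp [ih]
  | case4 a b' t hab ih =>
    simp only [rep1, if_neg hab]
    by_cases ha : a = '_'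
    · subst ha
      rw [cdn_cons_us, cdn_cons_us]
      cases b <;> simp [ih]
    · rw [cdn_cons_ne _ _ _ ha, cdn_cons_ne _ _ _ ha, ih]

theorem cdn_noadj (cs : List Char) (h : adjUU cs = false) :
    cdn false cs = cs ∧ (cs.head? ≠ some '_' → cdn true cs = cs) := by
  induction cs with
  | nil => exact ⟨rfl, fun _ => rfl⟩
  | cons c t ih =>
    have ht : adjUU t = false := by
      cases t with
      | nil => rfl
      | cons b t' =>
        simp only [adjUU, Bool.or_eq_false_iff] at h
        exact h.2
    by_cases hc : c = '_'
    · subst hc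
      have hhd : t.head? ≠ some '_' := by
        intro hh
        cases t with
        | nil => simp at hh
        | cons b t' =>
          simp only [List.head?] at hh
          injection hh with hb
          simp [adjUU, hb] at h
      have := (ih ht).2 hhd
      refine ⟨?_, fun hne => (hne rfl).elim⟩
      rw [cdn_cons_us]
      simp [this]
    · have := (ih ht).1
      constructor
      · simp only [cdn, if_neg hc]; rw [this]
      · intro _; simp only [cdn, if_neg hc]; rw [this]

theorem collapseWhile_toList (g : String) : (collapseWhile g).toList = cdn false g.toList := by
  induction g using collapseWhile.induct with
  | case1 g h ih =>
    rw [collapseWhile, if_pos h, ih]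
    have hlen : (PySem.Str.replace g "__" "_").toList = rep1 g.toList := by
      rw [PySem.Str.toList_replace]
      simpa using replace_two_eq_rep1 g.toList
    rw [hlen, cdn_rep1]
  | case2 g h =>
    rw [collapseWhile, if_neg h]
    have hninf : ¬ ['_', '_'] <:+: g.toList := by
      intro hinf
      exact h ((PySem.Str.isIn_iff_infix "__" g).mpr (by simpa using hinf))
    have hadj : adjUU g.toList = false := by
      cases hA : adjUU g.toList with
      | false => rfl
      | true => exact absurd ((adjUU_iff _).mp hA) hninf
    exact ((cdn_noadj _ hadj).1).symm

theorem altLoop_eq (l : List Char) (out : List Char) :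
    altLoop out l = out ++ cdn (out.getLast? == some '_') (l.map mpc) := by
  induction l generalizing out with
  | nil => simp [altLoop, cdn]
  | cons c t ih =>
    by_cases hc : c = '-' ∨ c = '_'
    · have hm : mpc c = '_' := by rcases hc with h | h <;> simp [mpc, h]
      by_cases hl : out.getLast? = some '_'
      · simp only [altLoop, if_pos hc, hl, ne_eq, not_true_eq_false, if_false]
        rw [ih out]
        simp only [List.map_cons, hm, hl]
        simp [cdn]
      · simp only [altLoop, if_pos hc, ne_eq, hl, not_false_eq_true, if_true]
        rw [ih (out ++ ['_'])]
        simp only [List.map_cons, hm]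
        have h1 : (out ++ ['_']).getLast? = some '_' := by simp
        have h2 : (out.getLast? == some '_') = false := by simpa using hl
        rw [h1, h2]
        simp [cdn]
    · have hm : mpc c = c := by
        have : c ≠ '-' := fun h => hc (Or.inl h)
        simp [mpc, this]
      have hcne : c ≠ '_' := fun h => hc (Or.inr h)
      simp only [altLoop, if_neg hc]
      rw [ih (out ++ [c])]
      simp only [List.map_cons, hm]
      have h1 : (out ++ [c]).getLast? = some c := by simp
      rw [h1]
      have h2 : (some c == some ('_' : Char)) = false := by simpa using hcne
      rw [h2]
      simp only [cdn, if_neg hcne]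
      simp

theorem core_eq (g : String) :
    (collapseWhile (PySem.Str.replace g "-" "_")).toList = altLoop [] g.toList := by
  rw [collapseWhile_toList, altLoop_eq]
  have : (PySem.Str.replace g "-" "_").toList = g.toList.map mpc := by
    rw [PySem.Str.toList_replace]
    simpa using replace_one_eq_map g.toList
  rw [this]
  simp [List.getLast?]

-- ===== VERDICT (by name: the statement is the Claim_ definition above) =====
theorem norm_game_id_py_spec : Claim_equal_norm_game_id_py := by
  unfold Claim_equal_norm_game_id_py
  intro gid _
  unfold Spec_norm_game_id_py
  cases gid with
  | none => rfl
  | some s =>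
    by_cases hg : PySem.Str.strip s = ""
    · simp [norm_game_id_py, norm_game_id_py_alt, hg]
    · have h := core_eq (PySem.Str.strip s)
      have hs : collapseWhile (PySem.Str.replace (PySem.Str.strip s) "-" "_")
          = String.ofList (altLoop [] (PySem.Str.strip s).toList) :=
        String.toList_injective (by rw [h, String.toList_ofList])
      simp only [norm_game_id_py, norm_game_id_py_alt, if_neg hg]
      rw [hs]
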